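-- pv_equiv track=rewrite | github.com/ClownJay/bioinfo2017 | C4-4E-Find a Cyclic Peptide with Theoretical Spectrum Matching an Ideal Spectrum.py | peptide_to_spectrum
-- ===== SOURCE A (Python) =====
-- def peptide_to_spectrum(peptide, is_circle=False):
--     spectrum = [0, sum(peptide)]
--     if is_circle:
--         for i in range(len(peptide)):
--             for j in range(i+1, len(peptide)):
--                 spectrum.append(sum(peptide[i:j]))
--             for j in range(0, i):
--                 spectrum.append(sum(peptide[i:]+peptide[:j]))
--     else:
--         for i in range(len(peptide)):
--             for j in range(i+1, len(peptide)):
--                 spectrum.append(sum(peptide[i:j]))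
--     return sorted(spectrum)
-- ===== SOURCE B (Python) =====
-- def peptide_to_spectrum(peptide, is_circle=False):
--     n = len(peptide)
--     total = sum(peptide)
--     spectrum = [0, total]
--     for L in range(1, n):
--         m = sum(peptide[:L])
--         if is_circle:
--             for i in range(n):
--                 spectrum.append(m)
--                 m += peptide[(i + L) % n] - peptide[i]
--         else:
--             for i in range(n - L):
--                 spectrum.append(m)
--                 m += peptide[i + L] - peptide[i]
--     return sorted(spectrum)
-- ===== Notes on version B (the rewrite author's own statement) =====
-- stated objective: faster
-- what changed: Replaces A's start/end nested loops that call sum() on every slice by a length-major sliding-window generation: for each subpeptide length the window mass is updated in O(1) per start (add entering element, subtract leaving one), so generation drops from O(n^3) to O(n^2).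
import Mathlib
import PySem

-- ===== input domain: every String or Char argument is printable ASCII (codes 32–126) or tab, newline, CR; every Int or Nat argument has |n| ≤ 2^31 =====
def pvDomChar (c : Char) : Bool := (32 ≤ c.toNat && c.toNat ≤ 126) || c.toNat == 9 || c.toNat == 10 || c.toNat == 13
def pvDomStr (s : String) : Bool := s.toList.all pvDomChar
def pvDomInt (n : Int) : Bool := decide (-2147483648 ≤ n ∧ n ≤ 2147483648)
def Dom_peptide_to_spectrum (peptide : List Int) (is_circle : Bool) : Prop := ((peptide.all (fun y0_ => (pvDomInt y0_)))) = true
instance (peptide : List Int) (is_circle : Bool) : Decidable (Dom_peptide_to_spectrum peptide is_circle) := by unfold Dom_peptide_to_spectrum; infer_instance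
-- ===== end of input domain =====

-- B generates the subpeptide masses length-major with a sliding window updated in O(1)
-- per start instead of A's start/end loops summing every slice (objective: faster, asymptotic).

-- ===== PORT A =====
def peptide_to_spectrum (peptide : List Int) (is_circle : Bool) : List Int :=
  let n : Int := (peptide.length : Int)
  let spectrum : List Int := [0, peptide.sum]
  let spectrum :=
    if is_circle then
      (PySem.List.pyRange 0 n 1).foldl (fun acc i =>
        let acc := (PySem.List.pyRange (i+1) n 1).foldl (fun acc j =>
          acc ++ [(PySem.List.slice peptide (some i) (some j)).sum]) acc
        (PySem.List.pyRange 0 i 1).foldl (fun acc j =>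
          acc ++ [((PySem.List.slice peptide (some i) none) ++ (PySem.List.slice peptide none (some j))).sum]) acc) spectrum
    else
      (PySem.List.pyRange 0 n 1).foldl (fun acc i =>
        (PySem.List.pyRange (i+1) n 1).foldl (fun acc j =>
          acc ++ [(PySem.List.slice peptide (some i) (some j)).sum]) acc) spectrum
  PySem.List.sorted spectrum (fun x => x) false

-- ===== PORT B =====
def peptide_to_spectrum_alt (peptide : List Int) (is_circle : Bool) : List Int :=
  let n : Int := (peptide.length : Int)
  let total : Int := peptide.sum
  let spectrum : List Int := [0, total]
  let spectrum :=
    (PySem.List.pyRange 1 n 1).foldl (fun spectrum L =>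
      let m : Int := (PySem.List.slice peptide none (some L)).sum
      if is_circle then
        ((PySem.List.pyRange 0 n 1).foldl (fun st i =>
            (st.1 ++ [st.2],
             st.2 + (PySem.List.pyGetD peptide (PySem.Int.mod (i + L) n) 0
                      - PySem.List.pyGetD peptide i 0)))
          (spectrum, m)).1
      else
        ((PySem.List.pyRange 0 (n - L) 1).foldl (fun st i =>
            (st.1 ++ [st.2],
             st.2 + (PySem.List.pyGetD peptide (i + L) 0
                      - PySem.List.pyGetD peptide i 0)))
          (spectrum, m)).1) spectrum
  PySem.List.sorted spectrum (fun x => x) false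

-- ===== PRECONDITION & SPEC =====
def Spec_peptide_to_spectrum (peptide : List Int) (is_circle : Bool) (out : List Int) : Prop := out = peptide_to_spectrum_alt peptide is_circle
instance (peptide : List Int) (is_circle : Bool) (out : List Int) : Decidable (Spec_peptide_to_spectrum peptide is_circle out) := by unfold Spec_peptide_to_spectrum; infer_instance

-- ===== CLAIM (what is proved, stated in full; the proofs are below) =====
def Claim_equal_peptide_to_spectrum : Prop := ∀ (peptide : List Int) (is_circle : Bool), Dom_peptide_to_spectrum peptide is_circle → Spec_peptide_to_spectrum peptide is_circle (peptide_to_spectrum peptide is_circle)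

-- ===== LEMMAS AND PROOFS =====

-- partial sum of the first k elements (Int index)
def pvS (p : List Int) (k : Int) : Int := (p.take k.toNat).sum

-- mass of the cyclic window of length L starting at i
def pvCyc (p : List Int) (L i : Int) : Int :=
  if i + L ≤ (p.length : Int) then pvS p (i + L) - pvS p i
  else p.sum - pvS p i + pvS p (i + L - (p.length : Int))

theorem pvS_zero (p : List Int) : pvS p 0 = 0 := by simp [pvS]

theorem pvS_len (p : List Int) : pvS p (p.length : Int) = p.sum := by simp [pvS]

theorem pvS_succ (p : List Int) (k : Int) (h0 : 0 ≤ k) (hk : k < (p.length : Int)) :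
    pvS p (k + 1) = pvS p k + PySem.List.pyGetD p k 0 := by
  unfold pvS
  have hklt : k.toNat < p.length := by omega
  rw [PySem.List.pyGetD_of_nonneg _ _ h0]
  have h1 : (k+1).toNat = k.toNat + 1 := by omega
  rw [h1, List.sum_take_succ _ _ hklt]
  simp [List.getD, hklt]

theorem pvSlice_sum (p : List Int) (i j : Int) (h0 : 0 ≤ i) (hij : i ≤ j) :
    (PySem.List.slice p (some i) (some j)).sum = pvS p j - pvS p i := by
  unfold pvS
  rw [PySem.List.slice_toNat _ h0 (le_trans h0 hij)]
  have h : j.toNat = i.toNat + (j.toNat - i.toNat) := by omega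
  conv_rhs => rw [h]
  rw [List.take_add, List.sum_append]
  ring

theorem pvWrap_sum (p : List Int) (i j : Int) (h0i : 0 ≤ i) (h0j : 0 ≤ j) :
    ((PySem.List.slice p (some i) none) ++ (PySem.List.slice p none (some j))).sum
      = p.sum - pvS p i + pvS p j := by
  unfold pvS
  rw [PySem.List.slice_from _ h0i, PySem.List.slice_to _ h0j, List.sum_append]
  have := List.take_append_drop i.toNat p
  have hs : (p.take i.toNat).sum + (p.drop i.toNat).sum = p.sum := by
    rw [← List.sum_append, this]
  omega

theorem pvMod_lo (x n : Int) (h0 : 0 ≤ x) (h : x < n) : PySem.Int.mod x n = x := by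
  rw [PySem.Int.mod_eq_emod_of_pos (by omega)]
  exact Int.emod_eq_of_lt h0 h

theorem pvMod_hi (x n : Int) (h0 : n ≤ x) (h : x < 2 * n) (hn : 0 < n) :
    PySem.Int.mod x n = x - n := by
  rw [PySem.Int.mod_eq_emod_of_pos hn]
  have : (x - n) % n = x % n := by
    simp
  rw [← this]
  exact Int.emod_eq_of_lt (by omega) (by omega)

-- the sliding-window pair fold writes out F a, F (a+1), … in order
theorem pvSlideFold (g F : Int → Int) (b : Int)
    (hF : ∀ i, 0 ≤ i → i < b → F (i + 1) = F i + g i) :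
    ∀ (a : Int) (acc : List Int), 0 ≤ a →
      ((PySem.List.pyRange a b 1).foldl
          (fun st i => (st.1 ++ [st.2], st.2 + g i)) (acc, F a)).1
        = acc ++ (PySem.List.pyRange a b 1).map F := by
  intro a acc ha
  by_cases hab : a < b
  · have hd : (b - a).toNat ≠ 0 := by omega
    generalize hn : (b - a).toNat = n at *
    induction n generalizing a acc with
    | zero => omega
    | succ n ih =>
      rw [PySem.List.pyRange_one_cons hab]
      simp only [List.foldl_cons, List.map_cons]
      rw [← hF a ha hab]
      by_cases hab2 : a + 1 < b
      · have := ih (a+1) (acc ++ [F a]) (by omega) hab2 (by omega) (by omega)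
        rw [this]; simp
      · have hb : b ≤ a + 1 := by omega
        rw [PySem.List.pyRange_one_eq_nil hb]
        simp
  · rw [PySem.List.pyRange_one_eq_nil (by omega)]
    simp

theorem pvIcoSucc (a b : Int) (h : a ≤ b) :
    Finset.Ico a (b + 1) = insert b (Finset.Ico a b) := by
  ext x; simp [Finset.mem_Ico, Finset.mem_insert]; omega

theorem pvCoeFlatMap (g : Int → List Int) (a b : Int) :
    (((PySem.List.pyRange a b 1).flatMap g : List Int) : Multiset Int)
      = ∑ x ∈ Finset.Ico a b, ((g x : List Int) : Multiset Int) := by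
  by_cases hab : a < b
  · generalize hn : (b - a).toNat = n at *
    induction n generalizing b with
    | zero => omega
    | succ n ih =>
      have hb : b = (b - 1) + 1 := by omega
      rw [hb, PySem.List.pyRange_one_succ_right (by omega),
        pvIcoSucc a (b-1) (by omega), Finset.sum_insert (by simp)]
      by_cases hab2 : a < b - 1
      · rw [List.flatMap_append]
        have := ih (b-1) hab2 (by omega)
        simp only [List.flatMap_cons, List.flatMap_nil, List.append_nil]
        rw [← Multiset.coe_add, this]
        exact add_comm _ _
      · have : b - 1 = a := by omega
        rw [this]
        simp [PySem.List.pyRange_one_eq_nil (le_refl a)]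
  · rw [PySem.List.pyRange_one_eq_nil (by omega), Finset.Ico_eq_empty (by omega)]
    simp

theorem pvCoeMap (h : Int → Int) (a b : Int) :
    (((PySem.List.pyRange a b 1).map h : List Int) : Multiset Int)
      = ∑ x ∈ Finset.Ico a b, ({h x} : Multiset Int) := by
  rw [List.map_eq_flatMap, pvCoeFlatMap]
  simp

theorem pvSumShift {M : Type} [AddCommMonoid M] (f : Int → M) (a b c : Int) :
    ∑ j ∈ Finset.Ico (a + c) (b + c), f j = ∑ i ∈ Finset.Ico a b, f (i + c) := by
  apply Finset.sum_nbij' (fun j => j - c) (fun i => i + c) <;>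
    simp [Finset.mem_Ico] <;> omega


theorem pvCycLo (p : List Int) (L i : Int) (_h0 : 0 ≤ i) (hc : i + L ≤ (p.length : Int)) :
    pvCyc p L i = pvS p (i + L) - pvS p i := by
  simp only [pvCyc, if_pos hc]

theorem pvCycHi (p : List Int) (L i : Int) (_h0 : 0 ≤ i) (hc : (p.length : Int) ≤ i + L) :
    pvCyc p L i = p.sum - pvS p i + pvS p (i + L - (p.length : Int)) := by
  simp only [pvCyc]
  split_ifs with h
  · have : i + L = (p.length : Int) := by omega
    rw [this, pvS_len, show ((p.length : Int) - (p.length : Int)) = 0 by omega, pvS_zero]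
    ring
  · rfl

theorem pvCycStep (p : List Int) (L i : Int) (hL1 : 1 ≤ L) (hLN : L < (p.length : Int))
    (hi0 : 0 ≤ i) (hiN : i < (p.length : Int)) :
    pvCyc p L (i + 1) = pvCyc p L i
      + (PySem.List.pyGetD p (PySem.Int.mod (i + L) (p.length : Int)) 0
          - PySem.List.pyGetD p i 0) := by
  have hN : (0:Int) < (p.length : Int) := by omega
  have eI := pvS_succ p i hi0 (by omega)
  rcases lt_trichotomy (i + L) (p.length : Int) with hc | hc | hc
  · rw [pvMod_lo _ _ (by omega) hc]
    have e2 := pvS_succ p (i + L) (by omega) hc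
    rw [pvCycLo p L (i+1) (by omega) (by omega), pvCycLo p L i hi0 (by omega)]
    rw [show i + 1 + L = (i + L) + 1 by ring, e2, eI]
    ring
  · rw [pvMod_hi _ _ (by omega) (by omega) hN]
    have e1 := pvS_succ p 0 le_rfl hN
    rw [pvCycHi p L (i+1) (by omega) (by omega), pvCycLo p L i hi0 (by omega)]
    rw [show i + 1 + L - (p.length : Int) = 0 + 1 by omega,
        show i + L - (p.length : Int) = 0 by omega, hc, pvS_len, e1, eI, pvS_zero]
    ring
  · rw [pvMod_hi _ _ (by omega) (by omega) hN]
    have e2 := pvS_succ p (i + L - (p.length : Int)) (by omega) (by omega)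
    rw [pvCycHi p L (i+1) (by omega) (by omega), pvCycHi p L i hi0 (by omega)]
    rw [show i + 1 + L - (p.length : Int) = (i + L - (p.length : Int)) + 1 by ring, e2, eI]
    ring

theorem pvSumIcoConsec (f : Int → Multiset Int) (a b c : Int) (h1 : a ≤ b) (h2 : b ≤ c) :
    ∑ x ∈ Finset.Ico a b, f x + ∑ x ∈ Finset.Ico b c, f x = ∑ x ∈ Finset.Ico a c, f x := by
  rw [← Finset.sum_union (Finset.Ico_disjoint_Ico_consecutive a b c),
      Finset.Ico_union_Ico_eq_Ico h1 h2]

theorem pvMainFalse (p : List Int) :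
    peptide_to_spectrum p false = peptide_to_spectrum_alt p false := by
  unfold peptide_to_spectrum peptide_to_spectrum_alt
  simp only [Bool.false_eq_true, if_false]
  -- A's folds become a flatMap of maps
  simp only [PySem.List.foldl_append_singleton_eq_map]
  rw [PySem.List.foldl_append_eq_flatMap]
  -- B's sliding-window folds become a flatMap of maps
  have hB : (PySem.List.pyRange 1 (p.length : Int) 1).foldl (fun spectrum L =>
        ((PySem.List.pyRange 0 ((p.length : Int) - L) 1).foldl (fun st i =>
            (st.1 ++ [st.2],
             st.2 + (PySem.List.pyGetD p (i + L) 0 - PySem.List.pyGetD p i 0)))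
          (spectrum, (PySem.List.slice p none (some L)).sum)).1) [0, p.sum]
      = [0, p.sum] ++ (PySem.List.pyRange 1 (p.length : Int) 1).flatMap (fun L =>
          (PySem.List.pyRange 0 ((p.length : Int) - L) 1).map
            (fun i => pvS p (i + L) - pvS p i)) := by
    rw [← PySem.List.foldl_append_eq_flatMap]
    apply PySem.List.foldl_congr_mem
    intro acc L hL
    rw [PySem.List.mem_pyRange_one] at hL
    have hm : (PySem.List.slice p none (some L)).sum
        = (fun i => pvS p (i + L) - pvS p i) 0 := by
      simp only [PySem.List.slice_to p (by omega : (0:Int) ≤ L), pvS]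
      simp
    rw [hm]
    refine pvSlideFold _ (fun i => pvS p (i + L) - pvS p i) _ ?_ 0 acc (le_refl 0)
    intro i hi0 hib
    show pvS p (i + 1 + L) - pvS p (i + 1)
        = pvS p (i + L) - pvS p i
          + (PySem.List.pyGetD p (i + L) 0 - PySem.List.pyGetD p i 0)
    have e1 := pvS_succ p i hi0 (by omega)
    have e2 := pvS_succ p (i + L) (by omega) (by omega)
    rw [show i + 1 + L = (i + L) + 1 by ring, e2, e1]
    ring
  rw [hB]
  -- sorted lists of permuted multisets are equal
  rw [PySem.List.sorted_id_eq_sorted_id_iff_perm]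
  apply List.Perm.append_left
  rw [← Multiset.coe_eq_coe]
  rw [pvCoeFlatMap, pvCoeFlatMap]
  simp only [pvCoeMap]
  calc ∑ i ∈ Finset.Ico (0:Int) (p.length : Int),
        ∑ j ∈ Finset.Ico (i+1) (p.length : Int),
          ({(PySem.List.slice p (some i) (some j)).sum} : Multiset Int)
      = ∑ i ∈ Finset.Ico (0:Int) (p.length : Int),
        ∑ L ∈ Finset.Ico (1:Int) ((p.length : Int) - i),
          ({pvS p (i + L) - pvS p i} : Multiset Int) := by
        apply Finset.sum_congr rfl
        intro i hi
        rw [Finset.mem_Ico] at hi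
        rw [show Finset.Ico (i+1) (p.length : Int)
              = Finset.Ico (1 + i) (((p.length : Int) - i) + i) from by
            rw [show i + 1 = 1 + i by ring, show ((p.length : Int) - i) + i = (p.length : Int) by ring]]
        rw [pvSumShift]
        apply Finset.sum_congr rfl
        intro L hLm
        rw [Finset.mem_Ico] at hLm
        rw [show L + i = i + L by ring, pvSlice_sum p i (i + L) hi.1 (by omega)]
    _ = ∑ L ∈ Finset.Ico (1:Int) (p.length : Int),
        ∑ i ∈ Finset.Ico (0:Int) ((p.length : Int) - L),
          ({pvS p (i + L) - pvS p i} : Multiset Int) := by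
        apply Finset.sum_comm'
        intro x y
        simp only [Finset.mem_Ico]
        omega

theorem pvMainTrue (p : List Int) :
    peptide_to_spectrum p true = peptide_to_spectrum_alt p true := by
  unfold peptide_to_spectrum peptide_to_spectrum_alt
  simp only [if_pos]
  -- A's folds become a flatMap of (map ++ map)
  simp only [PySem.List.foldl_append_singleton_eq_map]
  have hA : (PySem.List.pyRange 0 (p.length : Int) 1).foldl (fun acc i =>
        (acc ++ (PySem.List.pyRange (i+1) (p.length : Int) 1).map
            (fun j => (PySem.List.slice p (some i) (some j)).sum))
          ++ (PySem.List.pyRange 0 i 1).map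
            (fun j => ((PySem.List.slice p (some i) none)
                        ++ (PySem.List.slice p none (some j))).sum)) [0, p.sum]
      = [0, p.sum] ++ (PySem.List.pyRange 0 (p.length : Int) 1).flatMap (fun i =>
          (PySem.List.pyRange (i+1) (p.length : Int) 1).map
            (fun j => (PySem.List.slice p (some i) (some j)).sum)
          ++ (PySem.List.pyRange 0 i 1).map
            (fun j => ((PySem.List.slice p (some i) none)
                        ++ (PySem.List.slice p none (some j))).sum)) := by
    rw [← PySem.List.foldl_append_eq_flatMap]
    apply PySem.List.foldl_congr_mem
    intro acc i _
    rw [List.append_assoc]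
  rw [hA]
  -- B's sliding-window folds become a flatMap of maps of cyclic-window masses
  have hB : (PySem.List.pyRange 1 (p.length : Int) 1).foldl (fun spectrum L =>
        ((PySem.List.pyRange 0 (p.length : Int) 1).foldl (fun st i =>
            (st.1 ++ [st.2],
             st.2 + (PySem.List.pyGetD p (PySem.Int.mod (i + L) (p.length : Int)) 0
                      - PySem.List.pyGetD p i 0)))
          (spectrum, (PySem.List.slice p none (some L)).sum)).1) [0, p.sum]
      = [0, p.sum] ++ (PySem.List.pyRange 1 (p.length : Int) 1).flatMap (fun L =>
          (PySem.List.pyRange 0 (p.length : Int) 1).map (fun i => pvCyc p L i)) := by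
    rw [← PySem.List.foldl_append_eq_flatMap]
    apply PySem.List.foldl_congr_mem
    intro acc L hL
    rw [PySem.List.mem_pyRange_one] at hL
    have hm : (PySem.List.slice p none (some L)).sum = pvCyc p L 0 := by
      rw [pvCycLo p L 0 le_rfl (by omega), pvS_zero]
      simp only [PySem.List.slice_to p (by omega : (0:Int) ≤ L), pvS]
      ring_nf
    rw [hm]
    refine pvSlideFold _ (fun i => pvCyc p L i) _ ?_ 0 acc (le_refl 0)
    intro i hi0 hib
    exact pvCycStep p L i hL.1 hL.2 hi0 hib
  rw [hB]
  rw [PySem.List.sorted_id_eq_sorted_id_iff_perm]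
  apply List.Perm.append_left
  rw [← Multiset.coe_eq_coe]
  rw [pvCoeFlatMap, pvCoeFlatMap]
  simp only [← Multiset.coe_add, pvCoeMap]
  calc ∑ i ∈ Finset.Ico (0:Int) (p.length : Int),
        ((∑ j ∈ Finset.Ico (i+1) (p.length : Int),
          ({(PySem.List.slice p (some i) (some j)).sum} : Multiset Int))
         + ∑ j ∈ Finset.Ico (0:Int) i,
          ({((PySem.List.slice p (some i) none)
              ++ (PySem.List.slice p none (some j))).sum} : Multiset Int))
      = ∑ i ∈ Finset.Ico (0:Int) (p.length : Int),
        ∑ L ∈ Finset.Ico (1:Int) (p.length : Int), ({pvCyc p L i} : Multiset Int) := by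
        apply Finset.sum_congr rfl
        intro i hi
        rw [Finset.mem_Ico] at hi
        have h1 : ∑ j ∈ Finset.Ico (i+1) (p.length : Int),
            ({(PySem.List.slice p (some i) (some j)).sum} : Multiset Int)
            = ∑ L ∈ Finset.Ico (1:Int) ((p.length : Int) - i),
              ({pvCyc p L i} : Multiset Int) := by
          rw [show Finset.Ico (i+1) (p.length : Int)
                = Finset.Ico (1 + i) (((p.length : Int) - i) + i) from by
              rw [show i + 1 = 1 + i by ring,
                  show ((p.length : Int) - i) + i = (p.length : Int) by ring]]
          rw [pvSumShift]
          apply Finset.sum_congr rfl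
          intro L hLm
          rw [Finset.mem_Ico] at hLm
          rw [show L + i = i + L by ring, pvSlice_sum p i (i + L) hi.1 (by omega),
              pvCycLo p L i hi.1 (by omega)]
        have h2 : ∑ j ∈ Finset.Ico (0:Int) i,
            ({((PySem.List.slice p (some i) none)
                ++ (PySem.List.slice p none (some j))).sum} : Multiset Int)
            = ∑ L ∈ Finset.Ico ((p.length : Int) - i) (p.length : Int),
              ({pvCyc p L i} : Multiset Int) := by
          rw [show Finset.Ico (0:Int) i
                = Finset.Ico (((p.length : Int) - i) + (i - (p.length : Int)))
                    ((p.length : Int) + (i - (p.length : Int))) from by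
              rw [show ((p.length : Int) - i) + (i - (p.length : Int)) = 0 by ring,
                  show (p.length : Int) + (i - (p.length : Int)) = i by ring]]
          rw [pvSumShift]
          apply Finset.sum_congr rfl
          intro L hLm
          rw [Finset.mem_Ico] at hLm
          rw [pvWrap_sum p i (L + (i - (p.length : Int))) hi.1 (by omega),
              pvCycHi p L i hi.1 (by omega),
              show L + (i - (p.length : Int)) = i + L - (p.length : Int) by ring]
        rw [h1, h2]
        exact pvSumIcoConsec _ _ _ _ (by omega) (by omega)
    _ = ∑ L ∈ Finset.Ico (1:Int) (p.length : Int),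
        ∑ i ∈ Finset.Ico (0:Int) (p.length : Int), ({pvCyc p L i} : Multiset Int) :=
        Finset.sum_comm

-- ===== VERDICT (by name: the statement is the Claim_ definition above) =====
theorem peptide_to_spectrum_spec : Claim_equal_peptide_to_spectrum := by
  intro p c _
  unfold Spec_peptide_to_spectrum
  cases c
  · exact pvMainFalse p
  · exact pvMainTrue p
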